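-- pv_equiv track=rewrite | github.com/lucaszanchetta/onkyo_legacy_ha | custom_components/onkyo_legacy/coordinator.py | _build_source_lookup
-- ===== SOURCE A (Python) =====
-- def _build_source_lookup(
--     sources: dict[str, str],
--     raw_to_name: dict[str, str],
--     name_to_raw: dict[str, str],
-- ) -> dict[str, str]:
--     lookup: dict[str, str] = {}
--     for display_name, alias in sources.items():
--         lookup[alias.lower()] = display_name
--         raw = name_to_raw.get(alias.lower())
--         if raw is None:
--             continue
--         for candidate_alias, candidate_raw in name_to_raw.items():
--             if candidate_raw == raw:
--                 lookup[candidate_alias.lower()] = display_name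
--         canonical_alias = raw_to_name.get(raw)
--         if canonical_alias is not None:
--             lookup[canonical_alias.lower()] = display_name
--     return lookup
-- ===== SOURCE B (Python) =====
-- def _build_source_lookup(
--     sources: dict[str, str],
--     raw_to_name: dict[str, str],
--     name_to_raw: dict[str, str],
-- ) -> dict[str, str]:
--     # Group the aliases of name_to_raw by their raw value ONCE, so each source
--     # walks only its own alias group instead of rescanning all of name_to_raw.
--     aliases_of_raw: dict[str, list[str]] = {}
--     for alias, raw in name_to_raw.items():
--         aliases_of_raw.setdefault(raw, []).append(alias)
--     lookup: dict[str, str] = {}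
--     for display_name, alias in sources.items():
--         key = alias.lower()
--         lookup[key] = display_name
--         raw = name_to_raw.get(key)
--         if raw is not None:
--             extras = aliases_of_raw.get(raw, [])
--             canonical = raw_to_name.get(raw)
--             if canonical is not None:
--                 extras = extras + [canonical]
--             for name in extras:
--                 lookup[name.lower()] = display_name
--     return lookup
-- ===== Notes on version B (the rewrite author's own statement) =====
-- stated objective: alternative
-- what changed: Precompute a raw->aliases index over name_to_raw once, so each source walks its own alias group (group ++ canonical, one merged loop) instead of rescanning all of name_to_raw and patching the canonical alias afterwards.
import Mathlib
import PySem

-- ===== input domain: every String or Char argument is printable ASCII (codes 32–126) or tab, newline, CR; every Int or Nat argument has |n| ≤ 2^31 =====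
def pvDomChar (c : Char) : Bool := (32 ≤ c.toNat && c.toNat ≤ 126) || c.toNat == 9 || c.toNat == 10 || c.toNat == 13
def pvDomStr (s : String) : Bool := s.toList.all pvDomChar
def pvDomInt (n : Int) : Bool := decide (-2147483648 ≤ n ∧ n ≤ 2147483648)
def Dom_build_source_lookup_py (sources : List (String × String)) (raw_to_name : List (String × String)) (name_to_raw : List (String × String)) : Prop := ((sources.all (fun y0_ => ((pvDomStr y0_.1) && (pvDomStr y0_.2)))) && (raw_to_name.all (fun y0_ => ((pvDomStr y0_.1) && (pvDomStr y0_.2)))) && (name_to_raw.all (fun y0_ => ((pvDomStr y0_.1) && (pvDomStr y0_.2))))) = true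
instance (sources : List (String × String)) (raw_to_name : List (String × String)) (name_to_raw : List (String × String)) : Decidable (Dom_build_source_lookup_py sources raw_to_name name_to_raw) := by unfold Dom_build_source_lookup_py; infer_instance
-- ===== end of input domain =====

-- B replaces A's per-source rescan of name_to_raw by a raw->aliases index built once (alternative algorithm; return value proved equal).

-- ===== PORT A =====
-- literal port of A: for each source, insert the lowered alias, then scan ALL of
-- name_to_raw for entries sharing the alias's raw, then the canonical alias.
def build_source_lookup_py (sources : List (String × String)) (raw_to_name : List (String × String)) (name_to_raw : List (String × String)) : List (String × String) :=
  (sources.foldl (fun (lookup : PySem.Dict String String) p =>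
    let lookup := lookup.insert (PySem.Str.lower p.2) p.1
    match name_to_raw.lookup (PySem.Str.lower p.2) with
    | none => lookup
    | some raw =>
      let lookup := name_to_raw.foldl
        (fun lk q => if q.2 == raw then lk.insert (PySem.Str.lower q.1) p.1 else lk) lookup
      match raw_to_name.lookup raw with
      | none => lookup
      | some canonical => lookup.insert (PySem.Str.lower canonical) p.1) PySem.Dict.empty).items

-- ===== PORT B =====
-- literal port of Source B: build aliases_of_raw (raw -> list of aliases) once,
-- then per source walk only its group plus the canonical alias.
def build_source_lookup_py_alt (sources : List (String × String)) (raw_to_name : List (String × String)) (name_to_raw : List (String × String)) : List (String × String) :=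
  let aliases_of_raw : PySem.Dict String (List String) :=
    name_to_raw.foldl (fun g q => g.modify q.2 [] (fun xs => xs ++ [q.1])) PySem.Dict.empty
  (sources.foldl (fun (lookup : PySem.Dict String String) p =>
    let key := PySem.Str.lower p.2
    let lookup := lookup.insert key p.1
    match name_to_raw.lookup key with
    | none => lookup
    | some raw =>
      let extras := aliases_of_raw.getD raw []
      let extras := match raw_to_name.lookup raw with
        | none => extras
        | some canonical => extras ++ [canonical]
      extras.foldl (fun lk name => lk.insert (PySem.Str.lower name) p.1) lookup)
    PySem.Dict.empty).items

-- ===== PRECONDITION & SPEC =====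
def Spec_build_source_lookup_py (sources : List (String × String)) (raw_to_name : List (String × String)) (name_to_raw : List (String × String)) (out : List (String × String)) : Prop := out = build_source_lookup_py_alt sources raw_to_name name_to_raw
instance (sources : List (String × String)) (raw_to_name : List (String × String)) (name_to_raw : List (String × String)) (out : List (String × String)) : Decidable (Spec_build_source_lookup_py sources raw_to_name name_to_raw out) := by unfold Spec_build_source_lookup_py; infer_instance

-- ===== CLAIM (what is proved, stated in full; the proofs are below) =====
def Claim_equal_build_source_lookup_py : Prop := ∀ (sources : List (String × String)) (raw_to_name : List (String × String)) (name_to_raw : List (String × String)), Dom_build_source_lookup_py sources raw_to_name name_to_raw → Spec_build_source_lookup_py sources raw_to_name name_to_raw (build_source_lookup_py sources raw_to_name name_to_raw)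

-- ===== LEMMAS AND PROOFS =====

-- the precomputed group of a raw value is exactly the aliases A's inner scan visits
theorem groups_getD (name_to_raw : List (String × String)) (raw : String) :
    (name_to_raw.foldl (fun (g : PySem.Dict String (List String)) q =>
        g.modify q.2 [] (fun xs => xs ++ [q.1])) PySem.Dict.empty).getD raw []
      = (name_to_raw.filter (fun q => q.2 == raw)).map (fun q => q.1) := by
  have h := PySem.Dict.getD_foldl_modify_append (name_to_raw.map Prod.swap)
    (PySem.Dict.empty : PySem.Dict String (List String)) raw
  rw [List.foldl_map] at h
  simpa [Prod.swap, List.filter_map, Function.comp] using h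

-- A's guarded scan over name_to_raw equals B's walk over the precomputed group
theorem inner_eq (name_to_raw : List (String × String)) (raw dn : String)
    (lk : PySem.Dict String String) :
    name_to_raw.foldl (fun (lk : PySem.Dict String String) (q : String × String) => if q.2 == raw then lk.insert (PySem.Str.lower q.1) dn else lk) lk
      = ((name_to_raw.foldl (fun (g : PySem.Dict String (List String)) q =>
            g.modify q.2 [] (fun xs => xs ++ [q.1])) PySem.Dict.empty).getD raw []).foldl
          (fun lk a => lk.insert (PySem.Str.lower a) dn) lk := by
  rw [groups_getD, List.foldl_map,
    PySem.List.foldl_if_eq_foldl_filter (fun q => q.2 == raw)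
      (fun lk q => lk.insert (PySem.Str.lower q.1) dn) name_to_raw lk]

-- the tail of one outer-loop step: A's scan-then-maybe-canonical equals B's
-- fold over the group extended by the canonical alias (o = raw_to_name.get(raw))
theorem branch_eq (o : Option String) (name_to_raw : List (String × String))
    (raw dn : String) (lk : PySem.Dict String String) :
    (match o with
     | none => name_to_raw.foldl
         (fun (lk : PySem.Dict String String) (q : String × String) => if q.2 == raw then lk.insert (PySem.Str.lower q.1) dn else lk) lk
     | some canonical => (name_to_raw.foldl
         (fun (lk : PySem.Dict String String) (q : String × String) => if q.2 == raw then lk.insert (PySem.Str.lower q.1) dn else lk) lk).insert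
           (PySem.Str.lower canonical) dn)
    = (match o with
       | none => (name_to_raw.foldl (fun (g : PySem.Dict String (List String)) (q : String × String) =>
           g.modify q.2 [] (fun xs => xs ++ [q.1])) PySem.Dict.empty).getD raw []
       | some canonical => (name_to_raw.foldl (fun (g : PySem.Dict String (List String)) (q : String × String) =>
           g.modify q.2 [] (fun xs => xs ++ [q.1])) PySem.Dict.empty).getD raw [] ++ [canonical]).foldl
        (fun lk name => lk.insert (PySem.Str.lower name) dn) lk := by
  cases o with
  | none => exact inner_eq name_to_raw raw dn lk
  | some canonical =>
    rw [List.foldl_append, inner_eq]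
    rfl

-- ===== VERDICT (by name: the statement is the Claim_ definition above) =====
theorem build_source_lookup_py_spec : Claim_equal_build_source_lookup_py := by
  intro sources raw_to_name name_to_raw _
  unfold Spec_build_source_lookup_py build_source_lookup_py build_source_lookup_py_alt
  congr 1
  apply PySem.List.foldl_congr_mem
  intro acc p _
  show (match name_to_raw.lookup (PySem.Str.lower p.2) with
        | none => acc.insert (PySem.Str.lower p.2) p.1
        | some raw =>
          match raw_to_name.lookup raw with
          | none => name_to_raw.foldl
              (fun (lk : PySem.Dict String String) (q : String × String) => if q.2 == raw then lk.insert (PySem.Str.lower q.1) p.1 else lk)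
              (acc.insert (PySem.Str.lower p.2) p.1)
          | some canonical => (name_to_raw.foldl
              (fun (lk : PySem.Dict String String) (q : String × String) => if q.2 == raw then lk.insert (PySem.Str.lower q.1) p.1 else lk)
              (acc.insert (PySem.Str.lower p.2) p.1)).insert (PySem.Str.lower canonical) p.1)
      = (match name_to_raw.lookup (PySem.Str.lower p.2) with
         | none => acc.insert (PySem.Str.lower p.2) p.1
         | some raw =>
           (match raw_to_name.lookup raw with
            | none => (name_to_raw.foldl (fun (g : PySem.Dict String (List String)) (q : String × String) =>
                g.modify q.2 [] (fun xs => xs ++ [q.1])) PySem.Dict.empty).getD raw []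
            | some canonical => (name_to_raw.foldl (fun (g : PySem.Dict String (List String)) (q : String × String) =>
                g.modify q.2 [] (fun xs => xs ++ [q.1])) PySem.Dict.empty).getD raw [] ++ [canonical]).foldl
             (fun lk name => lk.insert (PySem.Str.lower name) p.1)
             (acc.insert (PySem.Str.lower p.2) p.1))
  cases name_to_raw.lookup (PySem.Str.lower p.2) with
  | none => rfl
  | some raw =>
    exact branch_eq (raw_to_name.lookup raw) name_to_raw raw p.1
      (acc.insert (PySem.Str.lower p.2) p.1)
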